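-- pv_equiv track=rewrite | github.com/AnthonyPetrosino/Coursework | computer_security_325/hw2/q4.py | guess_key
-- ===== SOURCE A (Python) =====
-- def guess_key(text):
--     letter_frequencies = [0] * 26
--
--     for char in text:  # Count frequency of each letter in the text block
--         if char.isalpha():
--             char = char.lower()
--             letter_frequencies[ord(char) - ord('a')] += 1
--
--     top_3 = []  # Get indices of the 3 most frequent letters
--     for i in range(3):
--         max_index = letter_frequencies.index(max(letter_frequencies))
--         top_3.append(max_index)
--         letter_frequencies[max_index] = -1
--
--     shifts = [(index - (ord('e') - ord('a'))) % 26 for index in top_3]  # Calculate shifts assuming each maps to 'e'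
--     return shifts
-- ===== SOURCE B (Python) =====
-- def guess_key(text):
--     freq = [0] * 26
--     for ch in text.lower():
--         k = ord(ch) - ord('a')
--         if 0 <= k < 26:
--             freq[k] += 1
--     top_3 = sorted(range(26), key=lambda i: (-freq[i], i))[:3]
--     return [(i - 4) % 26 for i in top_3]
-- ===== Notes on version B (the rewrite author's own statement) =====
-- stated objective: simpler
-- what changed: The three-round mutate-the-table argmax loop (max, index, overwrite with -1) is replaced by one sort of the 26 letter indices with the explicit tie-break key (-freq[i], i) followed by a slice of the first three.
import Mathlib
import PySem

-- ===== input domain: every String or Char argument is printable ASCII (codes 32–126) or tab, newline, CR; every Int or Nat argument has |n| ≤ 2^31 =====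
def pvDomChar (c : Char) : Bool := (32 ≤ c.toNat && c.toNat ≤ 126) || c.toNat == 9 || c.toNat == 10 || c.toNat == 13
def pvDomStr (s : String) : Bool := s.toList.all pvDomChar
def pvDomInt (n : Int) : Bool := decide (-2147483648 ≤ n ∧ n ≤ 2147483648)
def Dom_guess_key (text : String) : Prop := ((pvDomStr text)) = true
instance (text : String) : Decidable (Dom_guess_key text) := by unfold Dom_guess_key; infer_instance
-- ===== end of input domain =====

-- B replaces A's three-round mutate-and-rescan argmax loop by one sort of the 26 letter
-- indices with tie-break key (-freq[i], i) and a slice of the first three (objective: simpler).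

-- ===== PORT A =====
def guess_key (text : String) : List Int :=
  let letter_frequencies : List Int := PySem.List.pyRepeat [0] 26
  let letter_frequencies := text.toList.foldl (fun freq char =>
    if PySem.Chars.isalpha char then
      let c := PySem.Chars.lowerChar char
      PySem.List.pySetD freq ((c.toNat : Int) - 97)
        (PySem.List.pyGetD freq ((c.toNat : Int) - 97) 0 + 1)
    else freq) letter_frequencies
  let st := (PySem.List.pyRange 0 3).foldl (fun (st : List Int × List Int) _ =>
    let max_index : Nat :=
      (PySem.List.index? st.2 ((PySem.List.max? st.2 (fun x => x)).getD 0)).getD 0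
    (st.1 ++ [(max_index : Int)], PySem.List.pySetD st.2 (max_index : Int) (-1)))
    (([] : List Int), letter_frequencies)
  st.1.map (fun index => PySem.Int.mod (index - (101 - 97)) 26)

-- ===== PORT B =====
def guess_key_alt (text : String) : List Int :=
  let freq : List Int := PySem.List.pyRepeat [0] 26
  let freq := (PySem.Str.lower text).toList.foldl (fun f ch =>
    let k := ((ch.toNat : Int) - 97)
    if 0 ≤ k ∧ k < 26 then PySem.List.pySetD f k (PySem.List.pyGetD f k 0 + 1) else f) freq
  let top_3 := PySem.List.slice
    (PySem.List.sorted2 (PySem.List.pyRange 0 26)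
      (fun i => -(PySem.List.pyGetD freq i 0)) (fun i => i)) none (some 3)
  top_3.map (fun i => PySem.Int.mod (i - 4) 26)

-- ===== PRECONDITION & SPEC =====
def Spec_guess_key (text : String) (out : List Int) : Prop := out = guess_key_alt text
instance (text : String) (out : List Int) : Decidable (Spec_guess_key text out) := by unfold Spec_guess_key; infer_instance

-- ===== CLAIM (what is proved, stated in full; the proofs are below) =====
def Claim_equal_guess_key : Prop := ∀ (text : String), Dom_guess_key text → Spec_guess_key text (guess_key text)

-- ===== LEMMAS AND PROOFS =====

-- the argmax-index computation of one round of A's selection loop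
def pvPick (f : List Int) : Nat :=
  (PySem.List.index? f ((PySem.List.max? f (fun x => x)).getD 0)).getD 0

-- single Int encoding of the lexicographic key (-f[i], i) for i ∈ [0, 26)
def pvKeyN (f : List Int) (i : Nat) : Int := 26 * (-(f.getD i 0)) + (i : Int)

lemma pv_char_le_iff (a c : Char) : (a ≤ c) ↔ a.toNat ≤ c.toNat := by
  rw [Char.le_def, UInt32.le_iff_toNat_le]; rfl

lemma pv_isupper_iff (c : Char) : PySem.Chars.isupper c = true ↔ 65 ≤ c.toNat ∧ c.toNat ≤ 90 := by
  unfold PySem.Chars.isupper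
  rw [Bool.and_eq_true, decide_eq_true_iff, decide_eq_true_iff, pv_char_le_iff, pv_char_le_iff,
    show ('A'.toNat) = 65 from rfl, show ('Z'.toNat) = 90 from rfl]

lemma pv_islower_iff (c : Char) : PySem.Chars.islower c = true ↔ 97 ≤ c.toNat ∧ c.toNat ≤ 122 := by
  unfold PySem.Chars.islower
  rw [Bool.and_eq_true, decide_eq_true_iff, decide_eq_true_iff, pv_char_le_iff, pv_char_le_iff,
    show ('a'.toNat) = 97 from rfl, show ('z'.toNat) = 122 from rfl]

lemma pv_lowerChar_toNat (c : Char) :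
    (PySem.Chars.lowerChar c).toNat = if PySem.Chars.isupper c then c.toNat + 32 else c.toNat := by
  unfold PySem.Chars.lowerChar
  by_cases h : PySem.Chars.isupper c = true
  · have hb := (pv_isupper_iff c).mp h
    have hv : Nat.isValidChar (c.toNat + 32) := Or.inl (by omega)
    rw [if_pos h, if_pos h, Char.toNat_ofNat, if_pos hv]
  · rw [if_neg h, if_neg h]

-- one character of the two counting loops agree (A's step on c = B's step on lower(c))
lemma pv_char_step (f : List Int) (c : Char) :
    (if PySem.Chars.isalpha c then
      PySem.List.pySetD f (((PySem.Chars.lowerChar c).toNat : Int) - 97)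
        (PySem.List.pyGetD f (((PySem.Chars.lowerChar c).toNat : Int) - 97) 0 + 1)
    else f)
    = (if 0 ≤ (((PySem.Chars.lowerChar c).toNat : Int) - 97) ∧ (((PySem.Chars.lowerChar c).toNat : Int) - 97) < 26 then
        PySem.List.pySetD f (((PySem.Chars.lowerChar c).toNat : Int) - 97)
          (PySem.List.pyGetD f (((PySem.Chars.lowerChar c).toNat : Int) - 97) 0 + 1) else f) := by
  by_cases h : PySem.Chars.isalpha c = true
  · have hb : 97 ≤ (PySem.Chars.lowerChar c).toNat ∧ (PySem.Chars.lowerChar c).toNat ≤ 122 := by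
      unfold PySem.Chars.isalpha at h
      rw [Bool.or_eq_true] at h
      rcases h with h | h
      · rw [pv_lowerChar_toNat, if_pos h]
        have := (pv_isupper_iff c).mp h; omega
      · have hl := (pv_islower_iff c).mp h
        have hu : ¬ PySem.Chars.isupper c = true := by
          intro hu; have := (pv_isupper_iff c).mp hu; omega
        rw [pv_lowerChar_toNat, if_neg hu]; exact hl
    have hk : (0:Int) ≤ ((PySem.Chars.lowerChar c).toNat : Int) - 97 ∧
        ((PySem.Chars.lowerChar c).toNat : Int) - 97 < 26 := by
      constructor <;> [omega; omega]
    simp only [if_pos h, if_pos hk]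
  · have hu : ¬ PySem.Chars.isupper c = true := by
      intro hu; exact h (by unfold PySem.Chars.isalpha; rw [Bool.or_eq_true]; exact Or.inl hu)
    have hlc : (PySem.Chars.lowerChar c).toNat = c.toNat := by rw [pv_lowerChar_toNat, if_neg hu]
    have hnk : ¬ ((0:Int) ≤ ((PySem.Chars.lowerChar c).toNat : Int) - 97 ∧
        ((PySem.Chars.lowerChar c).toNat : Int) - 97 < 26) := by
      intro hk
      apply h
      unfold PySem.Chars.isalpha
      rw [Bool.or_eq_true]
      exact Or.inr ((pv_islower_iff c).mpr (by omega))
    simp only [if_neg h, if_neg hnk]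

-- the two counting loops produce the same frequency table
lemma pv_count_eq (cs : List Char) (f : List Int) :
    cs.foldl (fun freq char =>
      if PySem.Chars.isalpha char then
        PySem.List.pySetD freq (((PySem.Chars.lowerChar char).toNat : Int) - 97)
          (PySem.List.pyGetD freq (((PySem.Chars.lowerChar char).toNat : Int) - 97) 0 + 1)
      else freq) f
    = (PySem.Chars.lower cs).foldl (fun g ch => if 0 ≤ ((ch.toNat : Int) - 97) ∧ ((ch.toNat : Int) - 97) < 26 then PySem.List.pySetD g ((ch.toNat : Int) - 97) (PySem.List.pyGetD g ((ch.toNat : Int) - 97) 0 + 1) else g) f := by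
  unfold PySem.Chars.lower
  rw [List.foldl_map]
  induction cs generalizing f with
  | nil => rfl
  | cons c cs ih =>
    simp only [List.foldl_cons]
    rw [pv_char_step f c]
    exact ih _

-- the counting loop keeps the table 26 long with nonnegative entries
lemma pv_bfold_inv (cs : List Char) (f : List Int) (hl : f.length = 26)
    (hpos : ∀ i, i < 26 → 0 ≤ f.getD i 0) :
    (cs.foldl (fun g ch => if 0 ≤ ((ch.toNat : Int) - 97) ∧ ((ch.toNat : Int) - 97) < 26 then PySem.List.pySetD g ((ch.toNat : Int) - 97) (PySem.List.pyGetD g ((ch.toNat : Int) - 97) 0 + 1) else g) f).length = 26 ∧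
    ∀ i, i < 26 → 0 ≤ (cs.foldl (fun g ch => if 0 ≤ ((ch.toNat : Int) - 97) ∧ ((ch.toNat : Int) - 97) < 26 then PySem.List.pySetD g ((ch.toNat : Int) - 97) (PySem.List.pyGetD g ((ch.toNat : Int) - 97) 0 + 1) else g) f).getD i 0 := by
  induction cs generalizing f with
  | nil => exact ⟨hl, hpos⟩
  | cons c cs ih =>
    simp only [List.foldl_cons]
    by_cases hk : (0:Int) ≤ ((c.toNat : Int) - 97) ∧ ((c.toNat : Int) - 97) < 26
    · simp only [if_pos hk]
      set k : Int := ((c.toNat : Int) - 97) with hkdef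
      have hset : PySem.List.pySetD f k (PySem.List.pyGetD f k 0 + 1)
          = f.set k.toNat (PySem.List.pyGetD f k 0 + 1) := PySem.List.pySetD_of_nonneg f _ hk.1
      apply ih
      · rw [hset, List.length_set, hl]
      · intro i hi
        rw [hset]
        rw [List.getD_eq_getElem _ _ (by rw [List.length_set, hl]; omega), List.getElem_set]
        split
        · rw [PySem.List.pyGetD_of_nonneg f _ hk.1]
          have := hpos k.toNat (by omega)
          omega
        · rw [← List.getD_eq_getElem _ _ (by omega)]
          exact hpos i hi
    · simp only [if_neg hk]
      exact ih f hl hpos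

-- one round of A's selection loop: the picked index minimises the key among unpicked indices
lemma pv_pick_spec (f0 f : List Int) (hl : f.length = 26)
    (hpos : ∀ i, i < 26 → 0 ≤ f0.getD i 0)
    (hsync : ∀ i, i < 26 → f.getD i 0 = -1 ∨ f.getD i 0 = f0.getD i 0)
    (hex : ∃ i, i < 26 ∧ f.getD i 0 ≠ -1) :
    pvPick f < 26 ∧ f.getD (pvPick f) 0 ≠ -1 ∧
    ∀ j, j < 26 → j ≠ pvPick f → f.getD j 0 ≠ -1 → pvKeyN f0 (pvPick f) < pvKeyN f0 j := by
  obtain ⟨m, hm⟩ : ∃ m, PySem.List.max? f (fun x => x) = some m := by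
    cases h : PySem.List.max? f (fun x => x) with
    | none =>
      exfalso
      have := (PySem.List.max?_eq_none_iff f (fun x => x)).mp h
      rw [this] at hl; simp at hl
    | some m => exact ⟨m, rfl⟩
  have hmax : ∀ y ∈ f, y ≤ m := fun y hy => PySem.List.max?_isMax hm y hy
  have hmem : m ∈ f := PySem.List.max?_mem hm
  obtain ⟨i0, hi0, hne0⟩ := hex
  have hgd0 : f.getD i0 0 = f0.getD i0 0 := (hsync i0 hi0).resolve_left hne0
  have hmge : 0 ≤ m := by
    have h1 : f.getD i0 0 ∈ f := by
      rw [List.getD_eq_getElem _ _ (by omega)]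
      exact List.getElem_mem _
    have := hmax _ h1
    have := hpos i0 hi0
    omega
  obtain ⟨p, hp⟩ : ∃ p, PySem.List.index? f m = some p := by
    have := (PySem.List.index?_isSome_iff f m).mpr hmem
    exact Option.isSome_iff_exists.mp this
  have hpickp : pvPick f = p := by unfold pvPick; rw [hm, Option.getD_some, hp, Option.getD_some]
  obtain ⟨hk, hfp, hfirst⟩ := PySem.List.getElem_of_index?_eq_some hp
  have hp26 : p < 26 := by omega
  have hgdp : f.getD p 0 = m := by rw [List.getD_eq_getElem _ _ hk]; exact hfp
  have hfpne : f.getD p 0 ≠ -1 := by omega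
  have hfp0 : f.getD p 0 = f0.getD p 0 := (hsync p hp26).resolve_left hfpne
  refine hpickp ▸ ⟨hp26, hfpne, ?_⟩
  intro j hj hjp hjne
  have hgdj : f.getD j 0 = f0.getD j 0 := (hsync j hj).resolve_left hjne
  have hjle : f.getD j 0 ≤ m := by
    have : f.getD j 0 ∈ f := by
      rw [List.getD_eq_getElem _ _ (by omega)]
      exact List.getElem_mem _
    exact hmax _ this
  unfold pvKeyN
  by_cases hlt : f0.getD j 0 < m
  · omega
  · -- f0[j] = m, so j comes after p (p is the first index with value m)
    have hjm : f.getD j 0 = m := by omega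
    have hjgt : p < j := by
      rcases Nat.lt_trichotomy j p with h | h | h
      · exfalso
        apply hfirst j h
        rw [← List.getD_eq_getElem _ _ (by omega)]
        exact hjm
      · exact absurd h hjp
      · exact h
    omega

-- entries of f.set p (-1)
lemma pv_getD_set (f : List Int) (hl : f.length = 26) (p : Nat) (i : Nat) (hi : i < 26) :
    (f.set p (-1)).getD i 0 = if p = i then -1 else f.getD i 0 := by
  rw [List.getD_eq_getElem _ _ (by rw [List.length_set, hl]; omega), List.getElem_set]
  split
  · rfl
  · rw [← List.getD_eq_getElem _ _ (by omega)]

-- insertion with two comparators that agree on a set S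
lemma pv_insertBy_congr {α : Type} (lt1 lt2 : α → α → Bool) (x : α) (S : α → Prop) (hx : S x)
    (h : ∀ a b, S a → S b → lt1 a b = lt2 a b) :
    ∀ acc : List α, (∀ b ∈ acc, S b) →
      PySem.List.insertBy lt1 x acc = PySem.List.insertBy lt2 x acc := by
  intro acc
  induction acc with
  | nil => intro; rfl
  | cons y ys ih =>
    intro hacc
    show (if lt1 x y then x :: y :: ys else y :: PySem.List.insertBy lt1 x ys)
        = (if lt2 x y then x :: y :: ys else y :: PySem.List.insertBy lt2 x ys)
    rw [h x y hx (hacc y (by simp))]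
    by_cases hc : lt2 x y = true
    · rw [if_pos hc, if_pos hc]
    · rw [if_neg hc, if_neg hc, ih (fun b hb => hacc b (by simp [hb]))]

lemma pv_foldl_insertBy_congr {α : Type} (lt1 lt2 : α → α → Bool) (S : α → Prop)
    (h : ∀ a b, S a → S b → lt1 a b = lt2 a b) :
    ∀ (l acc : List α), (∀ a ∈ l, S a) → (∀ b ∈ acc, S b) →
      l.foldl (fun acc x => PySem.List.insertBy lt1 x acc) acc
        = l.foldl (fun acc x => PySem.List.insertBy lt2 x acc) acc := by
  intro l
  induction l with
  | nil => intros; rfl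
  | cons x xs ih =>
    intro acc hl hacc
    simp only [List.foldl_cons]
    rw [pv_insertBy_congr lt1 lt2 x S (hl x (by simp)) h acc hacc]
    apply ih
    · exact fun a ha => hl a (by simp [ha])
    · intro b hb
      rcases (PySem.List.mem_insertBy lt2 x b acc).mp hb with h1 | h1
      · exact h1 ▸ hl x (by simp)
      · exact hacc b h1

-- sorted2 with keys agreeing (on the sorted list's members) with a single linear key
lemma pv_sorted2_eq_sorted {α : Type} (xs : List α) (k1 k2 key : α → Int)
    (h : ∀ a b, a ∈ xs → b ∈ xs →
      (decide (k1 a < k1 b) || (!decide (k1 b < k1 a) && decide (k2 a < k2 b)))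
        = decide (key a < key b)) :
    PySem.List.sorted2 xs k1 k2 = PySem.List.sorted xs key := by
  rw [PySem.List.sorted_eq_foldl_insertBy]
  show xs.foldl (fun acc x => PySem.List.insertBy
      (fun a b => decide (k1 a < k1 b) || (!decide (k1 b < k1 a) && decide (k2 a < k2 b))) x acc) []
    = xs.foldl (fun acc x => PySem.List.insertBy (fun a b => decide (key a < key b)) x acc) []
  exact pv_foldl_insertBy_congr _ _ (· ∈ xs) h xs [] (fun a ha => ha) (by simp)

-- the Int-valued linear key encoding the lexicographic pair (-f[i], i) on [0, 26)
def pvKeyI (f : List Int) : Int → Int := fun i => 26 * (-(PySem.List.pyGetD f i 0)) + i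

lemma pv_keyI_cast (f : List Int) (q : Nat) : pvKeyI f (q : Int) = pvKeyN f q := by
  unfold pvKeyI pvKeyN
  rw [PySem.List.pyGetD_natCast]

-- the core: B's sort-and-slice equals A's three successive picks
lemma pv_top3_eq (f0 : List Int) (hl : f0.length = 26) (hpos : ∀ i, i < 26 → 0 ≤ f0.getD i 0) :
    PySem.List.slice
      (PySem.List.sorted2 (PySem.List.pyRange 0 26)
        (fun i => -(PySem.List.pyGetD f0 i 0)) (fun i => i)) none (some 3)
    = [((pvPick f0 : Nat) : Int),
       ((pvPick (f0.set (pvPick f0) (-1)) : Nat) : Int),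
       ((pvPick ((f0.set (pvPick f0) (-1)).set (pvPick (f0.set (pvPick f0) (-1))) (-1)) : Nat) : Int)] := by
  set p0 := pvPick f0 with hp0def
  set f1 := f0.set p0 (-1) with hf1def
  set p1 := pvPick f1 with hp1def
  set f2 := f1.set p1 (-1) with hf2def
  set p2 := pvPick f2 with hp2def
  have hl1 : f1.length = 26 := by rw [hf1def, List.length_set, hl]
  have hl2 : f2.length = 26 := by rw [hf2def, List.length_set, hl1]
  have hgd1 : ∀ i, i < 26 → f1.getD i 0 = if p0 = i then -1 else f0.getD i 0 :=
    fun i hi => pv_getD_set f0 hl p0 i hi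
  have hgd2 : ∀ i, i < 26 → f2.getD i 0 = if p1 = i then -1 else f1.getD i 0 :=
    fun i hi => pv_getD_set f1 hl1 p1 i hi
  -- stage 1
  obtain ⟨hp0lt, hp0ne, hp0min⟩ := pv_pick_spec f0 f0 hl hpos
    (fun i hi => Or.inr rfl) ⟨0, by omega, by have := hpos 0 (by omega); omega⟩
  rw [← hp0def] at hp0lt hp0ne hp0min
  -- stage 2
  have hsync1 : ∀ i, i < 26 → f1.getD i 0 = -1 ∨ f1.getD i 0 = f0.getD i 0 := by
    intro i hi
    rw [hgd1 i hi]
    split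
    · exact Or.inl rfl
    · exact Or.inr rfl
  have hex1 : ∃ i, i < 26 ∧ f1.getD i 0 ≠ -1 := by
    refine ⟨if p0 = 0 then 1 else 0, by split <;> omega, ?_⟩
    have hne : ¬ (p0 = if p0 = 0 then 1 else 0) := by split <;> omega
    have hlt : (if p0 = 0 then 1 else 0) < 26 := by split <;> omega
    rw [hgd1 _ hlt, if_neg hne]
    have := hpos _ hlt
    omega
  obtain ⟨hp1lt, hp1ne, hp1min⟩ := pv_pick_spec f0 f1 hl1 hpos hsync1 hex1
  rw [← hp1def] at hp1lt hp1ne hp1min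
  have hp1p0 : p1 ≠ p0 := by
    intro h
    rw [hgd1 p1 hp1lt, if_pos h.symm] at hp1ne
    exact hp1ne rfl
  have hval1 : ∀ j, j < 26 → j ≠ p0 → f1.getD j 0 = f0.getD j 0 := by
    intro j hj hne
    rw [hgd1 j hj, if_neg (fun h => hne h.symm)]
  -- stage 3
  have hsync2 : ∀ i, i < 26 → f2.getD i 0 = -1 ∨ f2.getD i 0 = f0.getD i 0 := by
    intro i hi
    rw [hgd2 i hi]
    split
    · exact Or.inl rfl
    · exact hsync1 i hi
  have hex2 : ∃ i, i < 26 ∧ f2.getD i 0 ≠ -1 := by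
    obtain ⟨i, hi, hne0, hne1⟩ : ∃ i, i < 26 ∧ i ≠ p0 ∧ i ≠ p1 := by
      refine ⟨if p0 = 0 then (if p1 = 1 then 2 else 1)
              else (if p1 = 0 then (if p0 = 1 then 2 else 1) else 0), ?_⟩
      split_ifs <;> omega
    refine ⟨i, hi, ?_⟩
    rw [hgd2 i hi, if_neg (fun h => hne1 h.symm), hval1 i hi hne0]
    have := hpos i hi
    omega
  obtain ⟨hp2lt, hp2ne, hp2min⟩ := pv_pick_spec f0 f2 hl2 hpos hsync2 hex2
  rw [← hp2def] at hp2lt hp2ne hp2min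
  have hp2p1 : p2 ≠ p1 := by
    intro h
    rw [hgd2 p2 hp2lt, if_pos h.symm] at hp2ne
    exact hp2ne rfl
  have hp2p0 : p2 ≠ p0 := by
    intro h
    rw [hgd2 p2 hp2lt, if_neg (fun hh => hp2p1 hh.symm), hgd1 p2 hp2lt, if_pos h.symm] at hp2ne
    exact hp2ne rfl
  have hval2 : ∀ j, j < 26 → j ≠ p0 → j ≠ p1 → f2.getD j 0 = f0.getD j 0 := by
    intro j hj h0 h1
    rw [hgd2 j hj, if_neg (fun h => h1 h.symm), hval1 j hj h0]
  have hf0ne : ∀ j, j < 26 → f0.getD j 0 ≠ -1 := by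
    intro j hj
    have := hpos j hj
    omega
  -- key ordering facts
  have k01 : pvKeyN f0 p0 < pvKeyN f0 p1 := hp0min p1 hp1lt hp1p0 (hf0ne p1 hp1lt)
  have k02 : pvKeyN f0 p0 < pvKeyN f0 p2 := hp0min p2 hp2lt hp2p0 (hf0ne p2 hp2lt)
  have k12 : pvKeyN f0 p1 < pvKeyN f0 p2 := by
    apply hp1min p2 hp2lt hp2p1
    rw [hval1 p2 hp2lt hp2p0]
    exact hf0ne p2 hp2lt
  have k0r : ∀ j, j < 26 → j ≠ p0 → pvKeyN f0 p0 < pvKeyN f0 j :=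
    fun j hj hne => hp0min j hj hne (hf0ne j hj)
  have k1r : ∀ j, j < 26 → j ≠ p0 → j ≠ p1 → pvKeyN f0 p1 < pvKeyN f0 j := by
    intro j hj h0 h1
    apply hp1min j hj h1
    rw [hval1 j hj h0]
    exact hf0ne j hj
  have k2r : ∀ j, j < 26 → j ≠ p0 → j ≠ p1 → j ≠ p2 → pvKeyN f0 p2 < pvKeyN f0 j := by
    intro j hj h0 h1 h2
    apply hp2min j hj h2
    rw [hval2 j hj h0 h1]
    exact hf0ne j hj
  -- the named sorted order
  set xs := PySem.List.pyRange 0 26 with hxsdef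
  set rem := xs.filter
    (fun i => decide (i ≠ (p0 : Int) ∧ i ≠ (p1 : Int) ∧ i ≠ (p2 : Int))) with hremdef
  set srem := PySem.List.sorted rem (pvKeyI f0) with hsremdef
  set ys := (p0 : Int) :: (p1 : Int) :: (p2 : Int) :: srem with hysdef
  have hbounds : ∀ a : Int, a ∈ xs → 0 ≤ a ∧ a < 26 := by
    intro a ha
    exact PySem.List.mem_pyRange_one.mp ha
  have hpk_mem : ∀ q : Nat, q < 26 → ((q : Int) ∈ xs) := by
    intro q hq
    exact PySem.List.mem_pyRange_one.mpr ⟨by omega, by omega⟩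
  have hsmem : ∀ y ∈ srem, ∃ j : Nat, y = (j : Int) ∧ j < 26 ∧ j ≠ p0 ∧ j ≠ p1 ∧ j ≠ p2 := by
    intro y hy
    rw [hsremdef, PySem.List.mem_sorted] at hy
    rw [hremdef, List.mem_filter] at hy
    obtain ⟨hyxs, hyp⟩ := hy
    rw [decide_eq_true_iff] at hyp
    obtain ⟨hy0, hy1, hy2⟩ := hyp
    have hb := hbounds y hyxs
    refine ⟨y.toNat, by omega, by omega, ?_, ?_, ?_⟩ <;> (intro h; omega)
  have hndxs : xs.Nodup := PySem.List.nodup_pyRange_one 0 26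
  have hndrem : rem.Nodup := List.Nodup.filter _ hndxs
  have hndsrem : srem.Nodup :=
    ((PySem.List.sorted_perm rem (pvKeyI f0) false).nodup_iff).mpr hndrem
  have hpk_notmem : ∀ q : Nat, ((q : Int)) ∉ srem ∨ (q ≠ p0 ∧ q ≠ p1 ∧ q ≠ p2) := by
    intro q
    by_cases h : ((q : Int)) ∈ srem
    · obtain ⟨j, hj, _, hj0, hj1, hj2⟩ := hsmem _ h
      have : j = q := by omega
      subst this
      exact Or.inr ⟨hj0, hj1, hj2⟩
    · exact Or.inl h
  have hp0_notmem : ((p0 : Int)) ∉ srem := by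
    rcases hpk_notmem p0 with h | h
    · exact h
    · exact absurd rfl h.1
  have hp1_notmem : ((p1 : Int)) ∉ srem := by
    rcases hpk_notmem p1 with h | h
    · exact h
    · exact absurd rfl h.2.1
  have hp2_notmem : ((p2 : Int)) ∉ srem := by
    rcases hpk_notmem p2 with h | h
    · exact h
    · exact absurd rfl h.2.2
  have hndys : ys.Nodup := by
    rw [hysdef]
    refine List.nodup_cons.mpr ⟨?_, List.nodup_cons.mpr ⟨?_, List.nodup_cons.mpr
      ⟨hp2_notmem, hndsrem⟩⟩⟩
    · simp only [List.mem_cons, not_or]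
      exact ⟨fun h => hp1p0 (by exact_mod_cast h.symm),
        fun h => hp2p0 (by exact_mod_cast h.symm), hp0_notmem⟩
    · simp only [List.mem_cons, not_or]
      exact ⟨fun h => hp2p1 (by exact_mod_cast h.symm), hp1_notmem⟩
  have hperm : ys.Perm xs := by
    rw [List.perm_ext_iff_of_nodup hndys hndxs]
    intro a
    constructor
    · intro h
      rw [hysdef] at h
      rcases List.mem_cons.mp h with h | h
      · exact h ▸ hpk_mem p0 hp0lt
      · rcases List.mem_cons.mp h with h | h
        · exact h ▸ hpk_mem p1 hp1lt
        · rcases List.mem_cons.mp h with h | h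
          · exact h ▸ hpk_mem p2 hp2lt
          · rw [hsremdef, PySem.List.mem_sorted, hremdef, List.mem_filter] at h
            exact h.1
    · intro h
      rw [hysdef]
      by_cases h0 : a = (p0 : Int)
      · exact List.mem_cons.mpr (Or.inl h0)
      by_cases h1 : a = (p1 : Int)
      · exact List.mem_cons.mpr (Or.inr (List.mem_cons.mpr (Or.inl h1)))
      by_cases h2 : a = (p2 : Int)
      · exact List.mem_cons.mpr (Or.inr (List.mem_cons.mpr (Or.inr (List.mem_cons.mpr
          (Or.inl h2)))))
      · refine List.mem_cons.mpr (Or.inr (List.mem_cons.mpr (Or.inr (List.mem_cons.mpr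
          (Or.inr ?_)))))
        rw [hsremdef, PySem.List.mem_sorted, hremdef, List.mem_filter]
        exact ⟨h, decide_eq_true_iff.mpr ⟨h0, h1, h2⟩⟩
  have hinj : ∀ a b : Int, a ∈ xs → b ∈ xs → pvKeyI f0 a = pvKeyI f0 b → a = b := by
    intro a b ha hb hk
    have hba := hbounds a ha
    have hbb := hbounds b hb
    unfold pvKeyI at hk
    omega
  have hsrem_pw : List.Pairwise (fun a b => pvKeyI f0 a < pvKeyI f0 b) srem := by
    have hle := PySem.List.sorted_pairwise rem (pvKeyI f0)
    rw [← hsremdef] at hle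
    rw [List.pairwise_iff_getElem] at hle ⊢
    intro i j hi hj hij
    refine lt_of_le_of_ne (hle i j hi hj hij) ?_
    intro heq
    have hsub : ∀ y ∈ srem, y ∈ xs := by
      intro y hy
      rw [hsremdef, PySem.List.mem_sorted, hremdef, List.mem_filter] at hy
      exact hy.1
    have := hinj _ _ (hsub _ (List.getElem_mem hi)) (hsub _ (List.getElem_mem hj)) heq
    rw [List.Nodup.getElem_inj_iff hndsrem] at this
    omega
  have hsrem_keys : ∀ y ∈ srem, pvKeyN f0 p0 < pvKeyI f0 y ∧ pvKeyN f0 p1 < pvKeyI f0 y ∧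
      pvKeyN f0 p2 < pvKeyI f0 y := by
    intro y hy
    obtain ⟨j, rfl, hj, hj0, hj1, hj2⟩ := hsmem y hy
    rw [pv_keyI_cast]
    exact ⟨k0r j hj hj0, k1r j hj hj0 hj1, k2r j hj hj0 hj1 hj2⟩
  have hpw : List.Pairwise (fun a b => pvKeyI f0 a < pvKeyI f0 b) ys := by
    rw [hysdef]
    refine List.pairwise_cons.mpr ⟨?_, List.pairwise_cons.mpr ⟨?_,
      List.pairwise_cons.mpr ⟨?_, hsrem_pw⟩⟩⟩
    · intro b hb
      rw [pv_keyI_cast]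
      rcases List.mem_cons.mp hb with h | h
      · rw [h, pv_keyI_cast]; exact k01
      rcases List.mem_cons.mp h with h | h
      · rw [h, pv_keyI_cast]; exact k02
      · exact (hsrem_keys b h).1
    · intro b hb
      rw [pv_keyI_cast]
      rcases List.mem_cons.mp hb with h | h
      · rw [h, pv_keyI_cast]; exact k12
      · exact (hsrem_keys b h).2.1
    · intro b hb
      rw [pv_keyI_cast]
      exact (hsrem_keys b hb).2.2
  have hs2 : PySem.List.sorted2 xs
      (fun i => -(PySem.List.pyGetD f0 i 0)) (fun i => i) = PySem.List.sorted xs (pvKeyI f0) := by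
    apply pv_sorted2_eq_sorted
    intro a b ha hb
    have hba := hbounds a ha
    have hbb := hbounds b hb
    rw [Bool.eq_iff_iff]
    simp only [Bool.or_eq_true, Bool.and_eq_true, Bool.not_eq_true', decide_eq_true_iff,
      decide_eq_false_iff_not]
    unfold pvKeyI
    omega
  have hsorted : PySem.List.sorted xs (pvKeyI f0) = ys :=
    PySem.List.sorted_eq_of_perm_of_pairwise_lt xs ys (pvKeyI f0) hperm hpw
  rw [hs2, hsorted, PySem.List.slice_to ys (by norm_num : (0:Int) ≤ 3)]
  rw [hysdef]
  rfl

-- A's selection loop unfolded to the three picks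
lemma pv_aloop_eq (f0 : List Int) :
    ((PySem.List.pyRange 0 3).foldl (fun (st : List Int × List Int) _ =>
      let max_index : Nat :=
        (PySem.List.index? st.2 ((PySem.List.max? st.2 (fun x => x)).getD 0)).getD 0
      (st.1 ++ [(max_index : Int)], PySem.List.pySetD st.2 (max_index : Int) (-1)))
      (([] : List Int), f0)).1
    = [((pvPick f0 : Nat) : Int),
       ((pvPick (f0.set (pvPick f0) (-1)) : Nat) : Int),
       ((pvPick ((f0.set (pvPick f0) (-1)).set (pvPick (f0.set (pvPick f0) (-1))) (-1)) : Nat) : Int)] := by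
  have hr : PySem.List.pyRange 0 3 = [0, 1, 2] := by decide
  rw [hr]
  simp only [List.foldl_cons, List.foldl_nil, PySem.List.pySetD_natCast]
  rfl

lemma pv_main (text : String) : guess_key text = guess_key_alt text := by
  unfold guess_key guess_key_alt
  simp only [PySem.List.pyRepeat_singleton, show ((26:Int).toNat) = 26 from rfl]
  rw [PySem.Str.toList_lower]
  rw [pv_count_eq text.toList (List.replicate 26 (0:Int))]
  obtain ⟨hlen, hpos⟩ := pv_bfold_inv (PySem.Chars.lower text.toList) (List.replicate 26 (0:Int))
    (by simp) (by
      intro i hi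
      rw [List.getD_eq_getElem _ _ (by rw [List.length_replicate]; omega), List.getElem_replicate])
  rw [pv_aloop_eq, pv_top3_eq _ hlen hpos]
  norm_num

-- ===== VERDICT =====
theorem guess_key_spec : Claim_equal_guess_key := by
  intro text _
  exact pv_main text
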